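-- pv_equiv track=rewrite | github.com/GabrielScarpelinDiniz/LeetCashRepo | YanomaFenandesKonwski/1323.py | maximum69Number
-- ===== SOURCE A (Python) =====
-- def maximum69Number (num):
--     lista = []
--     while num > 0:
--         lista.append(num % 10)
--         num //= 10
--     lista.reverse()
--     for i in range(len(lista)):
--         if lista[i] == 6:
--             lista[i] = 9
--             break
--     resposta = 0
--     rodadas = len(lista) - 1
--     for digito in lista:
--         resposta += digito * (10 ** rodadas)
--         rodadas -= 1
--     return resposta
-- ===== SOURCE B (Python) =====
-- def maximum69Number(num):
--     p, best = 1, 0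
--     while p <= num:
--         if (num // p) % 10 == 6:
--             best = p
--         p *= 10
--     return num + 3 * best
-- ===== Notes on version B (the rewrite author's own statement) =====
-- stated objective: alternative
-- what changed: B never builds a digit list: it scans powers of 10 once, remembers the largest power whose digit is 6, and returns num + 3*that power, instead of decomposing into a list, mutating the first 6, and rebuilding with positional weights.
-- outside the precondition, e.g. on maximum69Number(-6): A returns 0, B returns -6
import Mathlib
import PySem

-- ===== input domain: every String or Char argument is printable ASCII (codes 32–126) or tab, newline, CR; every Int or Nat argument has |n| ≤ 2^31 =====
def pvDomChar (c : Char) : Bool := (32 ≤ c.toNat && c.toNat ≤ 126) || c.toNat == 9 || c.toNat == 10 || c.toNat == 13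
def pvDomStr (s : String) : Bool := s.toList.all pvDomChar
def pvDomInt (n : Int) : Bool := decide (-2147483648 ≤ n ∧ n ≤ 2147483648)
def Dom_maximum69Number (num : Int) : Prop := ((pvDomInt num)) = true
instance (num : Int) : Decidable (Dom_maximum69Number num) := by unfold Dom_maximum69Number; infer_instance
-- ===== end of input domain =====

-- B replaces A's list-of-digits decomposition/mutation/rebuild by a single arithmetic scan over
-- powers of 10 (num + 3 * largest power whose digit is 6); equivalence is proved for num ≥ 0.

-- ===== PORT A =====

-- the while loop: lista.append(num % 10); num //= 10
def pvAWhile (num : Int) (lista : List Int) : List Int :=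
  if num > 0 then
    pvAWhile (PySem.Int.floordiv num 10) (lista ++ [PySem.Int.mod num 10])
  else lista
termination_by num.toNat
decreasing_by
  rw [PySem.Int.floordiv_eq_ediv_of_pos (by omega : (0:Int) < 10)]
  have _h2 : 10 * (num / 10) + num % 10 = num := Int.mul_ediv_add_emod num 10
  have _h3 : 0 ≤ num % 10 := Int.emod_nonneg num (by omega)
  have _h4 : num % 10 < 10 := Int.emod_lt_of_pos num (by omega)
  omega

-- the 'for i in range(len(lista)): if lista[i] == 6: lista[i] = 9; break' loop:
-- scans left to right and stops at the first 6
def pvAFix : List Int → List Int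
  | [] => []
  | d :: ds => if d = 6 then 9 :: ds else d :: pvAFix ds

-- the rebuild loop: resposta += digito * (10 ** rodadas); rodadas -= 1
-- (rodadas is never negative while a digit is processed, so 10 ** rodadas = 10 ^ rodadas.toNat exactly)
def pvARebuild (lista : List Int) (resposta rodadas : Int) : Int :=
  match lista with
  | [] => resposta
  | d :: ds => pvARebuild ds (resposta + d * 10 ^ rodadas.toNat) (rodadas - 1)

def maximum69Number (num : Int) : Int :=
  let lista := (pvAWhile num []).reverse
  let lista := pvAFix lista
  pvARebuild lista 0 ((lista.length : Int) - 1)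

-- ===== PORT B =====

-- the while loop: p ≤ num → remember p if the digit at p is 6; p *= 10
def pvBWhile (num p best : Int) (hp : 0 < p) : Int :=
  if h : p ≤ num then
    pvBWhile num (p * 10) (if PySem.Int.mod (PySem.Int.floordiv num p) 10 = 6 then p else best)
      (by omega)
  else best
termination_by (num + 1 - p).toNat
decreasing_by omega

def maximum69Number_alt (num : Int) : Int :=
  num + 3 * pvBWhile num 1 0 (by omega)

-- ===== PRECONDITION & SPEC =====
-- Pre_ excludes negative inputs, which are outside the problem's domain (the decimal digits of a
-- number): A's and B's values there are both arbitrary on this unspecified corner.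
def Pre_maximum69Number (num : Int) : Prop := 0 ≤ num
instance (num : Int) : Decidable (Pre_maximum69Number num) := by unfold Pre_maximum69Number; infer_instance
def pvWitness_maximum69Number : Int := 9669

def Spec_maximum69Number (num : Int) (out : Int) : Prop := out = maximum69Number_alt num
instance (num : Int) (out : Int) : Decidable (Spec_maximum69Number num out) := by unfold Spec_maximum69Number; infer_instance

-- ===== CLAIM (what is proved, stated in full; the proofs are below) =====
def Claim_equal_maximum69Number : Prop := ∀ (num : Int), Dom_maximum69Number num → Pre_maximum69Number num → Spec_maximum69Number num (maximum69Number num)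

-- ===== LEMMAS AND PROOFS =====

-- value of an LSB-first digit list
def pvVal : List Int → Int
  | [] => 0
  | d :: ds => d + 10 * pvVal ds

-- replace the LAST 6 in an LSB-first list (= A's first 6 in MSB order)
def pvG : List Int → List Int
  | [] => []
  | d :: ds => if 6 ∈ ds then d :: pvG ds else if d = 6 then 9 :: ds else d :: ds

-- last-6 power accumulator, LSB-first (mirror of B's loop on the digit list)
def pvLS : List Int → Int → Int → Int
  | [], _, best => best
  | d :: ds, p, best => pvLS ds (p * 10) (if d = 6 then p else best)

theorem pvAWhile_digits (n : Nat) : ∀ acc,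
    pvAWhile (n : Int) acc = acc ++ (Nat.digits 10 n).map (fun d : Nat => (d : Int)) := by
  induction n using Nat.strong_induction_on with
  | _ n ih =>
    intro acc
    rw [pvAWhile]
    by_cases h : (n : Int) > 0
    · have hn : 0 < n := by exact_mod_cast h
      simp only [h, if_true]
      have hfd : PySem.Int.floordiv (n : Int) 10 = ((n / 10 : Nat) : Int) := by
        exact_mod_cast PySem.Int.floordiv_natCast n 10
      have hmd : PySem.Int.mod (n : Int) 10 = ((n % 10 : Nat) : Int) := by
        exact_mod_cast PySem.Int.mod_natCast n 10
      rw [hfd, hmd, ih (n / 10) (Nat.div_lt_self hn (by omega))]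
      rw [Nat.digits_def' (by omega : 1 < 10) hn]
      simp
    · have hn : n = 0 := by omega
      simp [hn]

theorem pvAFix_append (xs ys : List Int) :
    pvAFix (xs ++ ys) = if 6 ∈ xs then pvAFix xs ++ ys else xs ++ pvAFix ys := by
  induction xs with
  | nil => simp
  | cons d ds ih =>
    by_cases hd : d = 6
    · simp [pvAFix, hd]
    · have hd' : ¬ ((6:Int) = d) := fun h => hd h.symm
      by_cases hm : 6 ∈ ds <;> simp [pvAFix, hd, hd', hm, ih]

theorem pvG_rev (l : List Int) : (pvAFix l.reverse).reverse = pvG l := by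
  induction l with
  | nil => rfl
  | cons d ds ih =>
    rw [List.reverse_cons, pvAFix_append]
    by_cases hm : 6 ∈ ds
    · simp [pvG, hm, ih]
    · have : 6 ∉ ds.reverse := by simpa using hm
      by_cases hd : d = 6 <;> simp [pvG, hm, hd, this, pvAFix]

theorem pvVal_append (xs : List Int) (d : Int) :
    pvVal (xs ++ [d]) = pvVal xs + d * 10 ^ xs.length := by
  induction xs with
  | nil => simp [pvVal]
  | cons x t ih => simp [pvVal, ih]; ring

theorem pvARebuild_val (l : List Int) : ∀ (r rod : Int), (l.length : Int) - 1 ≤ rod →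
    pvARebuild l r rod = r + pvVal l.reverse * 10 ^ (rod + 1 - l.length).toNat := by
  induction l with
  | nil => intro r rod _; simp [pvARebuild, pvVal]
  | cons d ds ih =>
    intro r rod hrod
    simp only [List.length_cons] at hrod ⊢
    rw [pvARebuild, ih _ (rod - 1) (by omega)]
    have h1 : (rod - 1 + 1 - (ds.length : Int)) = rod - ds.length := by ring
    rw [List.reverse_cons, pvVal_append, h1]
    have h2 : rod.toNat = ds.length + (rod - ds.length).toNat := by omega
    rw [h2]
    push_cast
    have h3 : (rod + 1 - ((ds.length : Int) + 1)) = rod - ds.length := by ring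
    rw [h3, List.length_reverse, pow_add]
    ring

theorem pvVal_digits (n : Nat) :
    pvVal ((Nat.digits 10 n).map (fun d : Nat => (d : Int))) = n := by
  induction n using Nat.strong_induction_on with
  | _ n ih =>
    by_cases hn : n = 0
    · simp [hn, pvVal]
    · rw [Nat.digits_def' (by omega : 1 < 10) (by omega)]
      simp only [List.map_cons, pvVal]
      rw [ih (n / 10) (Nat.div_lt_self (by omega) (by omega))]
      have := Nat.mod_add_div n 10
      omega

-- B's loop equals pvLS on the digit list of num / p
theorem pvBWhile_eq_pvLS (q : Nat) : ∀ (num p best : Int) (hp : 0 < p),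
    0 ≤ num → num / p = q →
    pvBWhile num p best hp = pvLS ((Nat.digits 10 q).map (fun d : Nat => (d : Int))) p best := by
  induction q using Nat.strong_induction_on with
  | _ q ih =>
    intro num p best hp hnum hq
    rw [pvBWhile]
    by_cases h : p ≤ num
    · have hq0 : 0 < q := by
        have : 1 ≤ num / p := Int.le_ediv_iff_mul_le hp |>.mpr (by omega)
        omega
      simp only [h, dite_true]
      have hfd : PySem.Int.floordiv num p = num / p := PySem.Int.floordiv_eq_ediv_of_pos hp
      have hmd : PySem.Int.mod (num / p) 10 = (num / p) % 10 := PySem.Int.mod_eq_emod_of_pos (by omega)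
      have hdiv : num / (p * 10) = (q : Int) / 10 := by
        rw [← hq, ← Int.ediv_ediv_of_nonneg (by omega : (0:Int) ≤ p)]
      have hq10 : ((q : Int)) / 10 = ((q / 10 : Nat) : Int) := by
        omega
      have := ih (q / 10) (Nat.div_lt_self hq0 (by omega)) num (p * 10)
        (if PySem.Int.mod (PySem.Int.floordiv num p) 10 = 6 then p else best) (by omega) hnum
        (by rw [hdiv, hq10])
      rw [this]
      rw [Nat.digits_def' (by omega : 1 < 10) hq0]
      simp only [List.map_cons, pvLS]
      have hcond : (PySem.Int.mod (PySem.Int.floordiv num p) 10 = 6) ↔ (((q % 10 : Nat) : Int) = 6) := by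
        rw [hfd, hmd, hq]; omega
      congr 1
      by_cases hc : ((q % 10 : Nat) : Int) = 6
      · rw [if_pos hc, if_pos (hcond.mpr hc)]
      · rw [if_neg hc, if_neg (fun hh => hc (hcond.mp hh))]
    · have : q = 0 := by
        have : num / p < 1 := Int.ediv_lt_iff_lt_mul hp |>.mpr (by omega)
        omega
      simp [h, this, pvLS]

-- accumulator homogeneity of pvLS
theorem pvLS_acc (l : List Int) : ∀ (p best : Int),
    pvLS l p best = if 6 ∈ l then p * pvLS l 1 0 else best := by
  induction l with
  | nil => intro p best; simp [pvLS]
  | cons d ds ih =>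
    intro p best
    by_cases hd : d = 6
    · subst hd
      rw [pvLS, pvLS, if_pos rfl, if_pos rfl, if_pos List.mem_cons_self, ih (p * 10) p, ih (1 * 10) 1]
      by_cases hm : 6 ∈ ds
      · rw [if_pos hm, if_pos hm]; ring
      · rw [if_neg hm, if_neg hm]; ring
    · have hd' : ¬ ((6:Int) = d) := fun h => hd h.symm
      rw [pvLS, pvLS, if_neg hd, if_neg hd, ih (p * 10) best, ih (1 * 10) 0]
      by_cases hm : 6 ∈ ds
      · rw [if_pos hm, if_pos hm, if_pos (List.mem_cons.mpr (Or.inr hm))]; ring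
      · rw [if_neg hm, if_neg hm, if_neg (fun hmem => (List.mem_cons.mp hmem).elim hd' hm)]

-- changing the last 6 to 9 adds 3 times the corresponding power of 10
theorem pvVal_pvG (l : List Int) : pvVal (pvG l) = pvVal l + 3 * pvLS l 1 0 := by
  induction l with
  | nil => simp [pvG, pvVal, pvLS]
  | cons d ds ih =>
    by_cases hm : 6 ∈ ds
    · rw [pvG, if_pos hm, pvVal, pvVal, ih, pvLS, one_mul, pvLS_acc ds 10, if_pos hm]
      ring
    · by_cases hd : d = 6
      · subst hd
        have h1 : pvG (6 :: ds) = 9 :: ds := by rw [pvG, if_neg hm, if_pos rfl]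
        have h2 : pvLS (6 :: ds) 1 0 = pvLS ds 10 1 := by rw [pvLS, if_pos rfl, one_mul]
        rw [h1, h2, pvLS_acc ds 10 1, if_neg hm, pvVal, pvVal]
        ring
      · have h1 : pvG (d :: ds) = d :: ds := by rw [pvG, if_neg hm, if_neg hd]
        have h2 : pvLS (d :: ds) 1 0 = pvLS ds 10 0 := by rw [pvLS, if_neg hd, one_mul]
        rw [h1, h2, pvLS_acc ds 10 0, if_neg hm]
        ring

-- ===== VERDICT (by name: the statement is the Claim_ definition above) =====
theorem pvAFix_length (l : List Int) : (pvAFix l).length = l.length := by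
  induction l with
  | nil => rfl
  | cons d t iht => by_cases hd : d = 6 <;> simp [pvAFix, hd, iht]

theorem maximum69Number_spec : Claim_equal_maximum69Number := by
  intro num _ hpre
  have h0 : 0 ≤ num := hpre
  unfold Spec_maximum69Number maximum69Number maximum69Number_alt
  obtain ⟨n, rfl⟩ : ∃ n : Nat, num = (n : Int) := ⟨num.toNat, by omega⟩
  set ds : List Int := (Nat.digits 10 n).map (fun d : Nat => (d : Int)) with hds
  have hwh : pvAWhile (n : Int) [] = ds := by rw [pvAWhile_digits]; simp [hds]
  have hlen : (pvAFix ds.reverse).length = ds.length := by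
    rw [pvAFix_length, List.length_reverse]
  rw [hwh, pvARebuild_val _ _ _ (le_refl _), hlen]
  have : ((ds.length : Int) - 1 + 1 - ds.length) = 0 := by ring
  rw [this]
  simp only [Int.toNat_zero, pow_zero, mul_one, zero_add]
  rw [pvG_rev, pvVal_pvG, hds, pvVal_digits]
  rw [pvBWhile_eq_pvLS n (n : Int) 1 0 (by omega) (by omega) (by simp)]
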